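-- pv_equiv track=rewrite | github.com/vidyut-19/Phil | salients.py | find_min_count
-- ===== SOURCE A (Python) =====
-- def count_tokens(tokens):
--     '''
--     Counts each distinct token (entity) in a list of tokens.
--
--     Inputs:
--         tokens: list of tokens (must be immutable)
--
--     Returns: dictionary that maps tokens to counts
--     '''
--     token_dict = {}
--
--     for token in tokens:
--         if token not in token_dict:
--             token_dict[token] = 1
--         else:
--             token_dict[token] += 1
--     return token_dict
--
-- def find_min_count(tokens, min_count):
--     '''
--     Find the tokens that occur *at least* min_count times.
--
--     Inputs:
--         tokens: a list of tokens  (must be immutable)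
--         min_count: a non-negative integer
--
--     Returns: set of tokens
--     '''
--
--     #Error checking (DO NOT MODIFY)
--     if min_count < 0:
--         raise ValueError("min_count must be a non-negative integer")
--
--     token_set = set()
--     token_dict = count_tokens(tokens)
--
--     for token, count in token_dict.items():
--         if count >= min_count:
--             token_set.add(token)
--
--     return token_set
-- ===== SOURCE B (Python) =====
-- def find_min_count(tokens, min_count):
--     '''
--     Find the tokens that occur *at least* min_count times.
--
--     Partition-and-extract: repeatedly take the first token of the remaining
--     list, strip all of its occurrences (its count is the length difference),
--     and keep it if that count reaches min_count.  No counting dict, no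
--     separate filter phase.
--     '''
--     if min_count < 0:
--         raise ValueError("min_count must be a non-negative integer")
--     result = set()
--     rest = list(tokens)
--     while rest:
--         t = rest[0]
--         remaining = [x for x in rest if x != t]
--         if len(rest) - len(remaining) >= min_count:
--             result.add(t)
--         rest = remaining
--     return result
-- ===== Notes on version B (the rewrite author's own statement) =====
-- stated objective: alternative
-- what changed: Replaced the count-dict-then-filter two-phase algorithm by a repeated partition-and-extract loop: take the first remaining token, strip all its occurrences (its count is the length difference), keep it if that count reaches min_count, and continue on the remainder - no dictionary and no second phase.
import Mathlib
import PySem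

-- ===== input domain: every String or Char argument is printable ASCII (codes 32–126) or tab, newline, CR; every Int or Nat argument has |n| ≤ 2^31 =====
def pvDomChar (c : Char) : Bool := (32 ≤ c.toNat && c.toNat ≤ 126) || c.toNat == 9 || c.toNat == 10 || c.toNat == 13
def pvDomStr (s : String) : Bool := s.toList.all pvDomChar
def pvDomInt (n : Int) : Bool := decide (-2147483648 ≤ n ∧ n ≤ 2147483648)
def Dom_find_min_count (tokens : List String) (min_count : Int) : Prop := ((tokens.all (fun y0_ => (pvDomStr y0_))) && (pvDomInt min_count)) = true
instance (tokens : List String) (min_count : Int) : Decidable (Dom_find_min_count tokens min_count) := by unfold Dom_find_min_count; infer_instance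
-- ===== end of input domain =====

-- B replaces A's count-dict-then-filter two-phase algorithm by a repeated
-- partition-and-extract loop over the token list (alternative decomposition, no dict).

-- ===== PORT A =====
def count_tokens (tokens : List String) : PySem.Dict String Int :=
  tokens.foldl
    (fun token_dict token =>
      if token_dict.contains token = false then token_dict.insert token 1
      else token_dict.insert token (token_dict.getD token 0 + 1))
    PySem.Dict.empty

def find_min_count (tokens : List String) (min_count : Int) : List String :=
  if min_count < 0 then []   -- Python raises ValueError here; excluded by Pre_
  else
    (PySem.Dict.items (count_tokens tokens)).foldl
      (fun token_set p => if min_count ≤ p.2 then PySem.Set.add token_set p.1 else token_set)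
      PySem.Set.empty

-- ===== PORT B =====
-- the while loop of Source B: rest shrinks by at least its head each round
def fmcGo (min_count : Int) (rest : List String) (result : PySem.Set String) : PySem.Set String :=
  match rest with
  | [] => result
  | t :: l =>
      -- remaining = [x for x in rest if x != t]; if len(rest)-len(remaining) >= min_count: result.add(t)
      fmcGo min_count (l.filter (fun x => x != t))
        (if min_count ≤ ((t :: l).length : Int) - ((l.filter (fun x => x != t)).length : Int)
         then PySem.Set.add result t else result)
termination_by rest.length
decreasing_by
  simpa using Nat.lt_succ_of_le (List.length_filter_le _ _)

def find_min_count_alt (tokens : List String) (min_count : Int) : List String :=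
  if min_count < 0 then []   -- Python raises ValueError here; excluded by Pre_
  else fmcGo min_count tokens PySem.Set.empty

-- ===== PRECONDITION & SPEC =====
-- Pre_ excludes exactly min_count < 0, where both Pythons raise ValueError.
def Pre_find_min_count (tokens : List String) (min_count : Int) : Prop := 0 ≤ min_count
instance (tokens : List String) (min_count : Int) : Decidable (Pre_find_min_count tokens min_count) := by unfold Pre_find_min_count; infer_instance

def pvWitness_find_min_count : List String × Int := (["a", "b", "a"], 2)

def Spec_find_min_count (tokens : List String) (min_count : Int) (out : List String) : Prop := out = find_min_count_alt tokens min_count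
instance (tokens : List String) (min_count : Int) (out : List String) : Decidable (Spec_find_min_count tokens min_count out) := by unfold Spec_find_min_count; infer_instance

-- ===== CLAIM =====
def Claim_equal_find_min_count : Prop := ∀ (tokens : List String) (min_count : Int), Dom_find_min_count tokens min_count → Pre_find_min_count tokens min_count → Spec_find_min_count tokens min_count (find_min_count tokens min_count)

-- ===== LEMMAS AND PROOFS =====

-- A's hand-written counting dict is Python's Counter.
theorem count_tokens_eq_counter (tokens : List String) :
    count_tokens tokens = PySem.Dict.counter tokens := by
  unfold count_tokens PySem.Dict.counter
  congr 1
  funext d t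
  by_cases h : d.contains t
  · simp [h, PySem.Dict.modify]
  · have h' : d.contains t = false := by simpa using h
    simp [h', PySem.Dict.modify, PySem.Dict.getD_of_not_contains _ _ h']

-- first-occurrence dedup by repeated partition, the skeleton of B's loop
def dedupF (l : List String) : List String :=
  match l with
  | [] => []
  | t :: l' => t :: dedupF (l'.filter (fun x => x != t))
termination_by l.length
decreasing_by
  simpa using Nat.lt_succ_of_le (List.length_filter_le _ _)

-- fold of add-if over a fresh nodup list appends its filtered elements
theorem foldl_addIf_nodup (p : String → Bool) :
    ∀ (l : List String) (s : PySem.Set String), l.Nodup → (∀ x ∈ l, x ∉ s) →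
      l.foldl (fun s t => if p t then PySem.Set.add s t else s) s = s ++ l.filter p := by
  intro l
  induction l with
  | nil => intro s _ _; simp
  | cons a l ih =>
    intro s hnd hfresh
    have ha : a ∉ s := hfresh a (by simp)
    by_cases hp : p a
    · have : PySem.Set.add s a = s ++ [a] := PySem.Set.add_of_not_mem ha
      simp only [List.foldl_cons, hp, if_true, List.filter_cons, this]
      rw [ih (s ++ [a]) hnd.of_cons]
      · simp
      · intro x hx
        simp only [List.mem_append, List.mem_singleton]
        rintro (h | rfl)
        · exact hfresh x (by simp [hx]) h
        · exact (List.nodup_cons.mp hnd).1 hx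
    · simp only [List.foldl_cons, List.filter_cons, hp, Bool.false_eq_true, if_false]
      rw [ih s hnd.of_cons (fun x hx => hfresh x (by simp [hx]))]

-- foldl add ignores elements already present
theorem foldl_add_filter_ne (t : String) :
    ∀ (l : List String) (s : PySem.Set String), t ∈ s →
      l.foldl PySem.Set.add s = (l.filter (fun x => x != t)).foldl PySem.Set.add s := by
  intro l
  induction l with
  | nil => intro s _; simp
  | cons a l ih =>
    intro s ht
    by_cases ha : a = t
    · subst ha
      simp only [List.foldl_cons, List.filter_cons, bne_self_eq_false, Bool.false_eq_true,
        if_false, PySem.Set.add_of_mem ht]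
      exact ih s ht
    · have : (a != t) = true := by simpa using ha
      simp only [List.foldl_cons, List.filter_cons, this, if_true]
      exact ih (PySem.Set.add s a) (by rw [PySem.Set.mem_add]; exact Or.inl ht)

-- a head element absent from the rest of the fold stays in front
theorem foldl_add_cons (t : String) :
    ∀ (l : List String) (s : PySem.Set String), (∀ x ∈ l, x ≠ t) →
      l.foldl PySem.Set.add (t :: s) = t :: l.foldl PySem.Set.add s := by
  intro l
  induction l with
  | nil => intro s _; simp
  | cons a l ih =>
    intro s hne
    have ha : a ≠ t := hne a (by simp)
    have hadd : PySem.Set.add (t :: s) a = t :: PySem.Set.add s a := by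
      simp only [PySem.Set.add_eq_ite, List.mem_cons]
      by_cases hm : a ∈ s
      · simp [hm, ha]
      · simp [hm, ha]
    simp only [List.foldl_cons, hadd]
    exact ih (PySem.Set.add s a) (fun x hx => hne x (by simp [hx]))

-- set(xs) is exactly first-occurrence dedup by repeated partition
theorem ofList_eq_dedupF : ∀ (l : List String), PySem.Set.ofList l = dedupF l := by
  intro l
  induction hl : l.length using Nat.strong_induction_on generalizing l with
  | _ n ih =>
    match l with
    | [] => simp [dedupF]
    | t :: l' =>
      rw [dedupF]
      have h1 : PySem.Set.ofList (t :: l') = l'.foldl PySem.Set.add [t] := by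
        rw [PySem.Set.ofList_eq_foldl]; rfl
      have h2 : l'.foldl PySem.Set.add ([t] : PySem.Set String)
          = (l'.filter (fun x => x != t)).foldl PySem.Set.add [t] :=
        foldl_add_filter_ne t l' [t] (by simp)
      have h3 : (l'.filter (fun x => x != t)).foldl PySem.Set.add ([t] : PySem.Set String)
          = t :: (l'.filter (fun x => x != t)).foldl PySem.Set.add [] := by
        refine foldl_add_cons t _ [] ?_
        intro x hx
        have := List.of_mem_filter hx
        simpa using this
      have h4 : ((l'.filter (fun x => x != t)).foldl PySem.Set.add ([] : PySem.Set String))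
          = dedupF (l'.filter (fun x => x != t)) := by
        rw [← PySem.Set.ofList_eq_foldl]
        refine ih (l'.filter (fun x => x != t)).length ?_ _ rfl
        subst hl
        simpa using Nat.lt_succ_of_le (List.length_filter_le _ _)
      rw [h1, h2, h3, h4]

-- the partition step measures the count of the head token
theorem length_sub_filter_eq_count (t : String) (l : List String) :
    (((t :: l).length : Int) - ((l.filter (fun x => x != t)).length : Int))
      = ((t :: l).count t : Int) := by
  have h2 : l.length = (l.filter (fun x => x != t)).length + (l.filter (fun x => !(x != t))).length :=
    List.length_eq_length_filter_add _
  have h3 : (t :: l).count t = l.count t + 1 := by simp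
  have h4 : (l.filter (fun x => !(x != t))).length = l.count t := by
    simp only [bne, Bool.not_not]
    rw [← List.countP_eq_length_filter]
    rfl
  simp only [List.length_cons, h3]
  push_cast
  omega

-- counts of surviving tokens are unchanged by the partition step
theorem count_filter_ne (u t : String) (l : List String) (h : u ≠ t) :
    (l.filter (fun x => x != t)).count u = l.count u := by
  apply List.count_filter
  simpa using h

-- B's loop collects the qualifying tokens of rest behind the accumulator
theorem fmcGo_eq (m : Int) :
    ∀ (rest : List String) (s : PySem.Set String), (∀ x ∈ rest, x ∉ s) →
      fmcGo m rest s = s ++ (dedupF rest).filter (fun t => decide (m ≤ (rest.count t : Int))) := by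
  intro rest
  induction hn : rest.length using Nat.strong_induction_on generalizing rest with
  | _ n ih =>
    match rest with
    | [] => intro s _; simp [fmcGo, dedupF]
    | t :: l =>
      intro s hfresh
      have ht : t ∉ s := hfresh t (by simp)
      rw [fmcGo, dedupF]
      set remaining := l.filter (fun x => x != t) with hrem
      have hlen : (((t :: l).length : Int) - (remaining.length : Int)) = ((t :: l).count t : Int) :=
        length_sub_filter_eq_count t l
      have hrem_ne : ∀ x ∈ remaining, x ≠ t := by
        intro x hx; simpa using List.of_mem_filter hx
      have hsub : ∀ x ∈ remaining, x ∈ l := fun x hx => List.mem_of_mem_filter hx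
      set s' := if m ≤ (((t :: l).length : Int) - (remaining.length : Int))
                then PySem.Set.add s t else s with hs'
      have hfresh' : ∀ x ∈ remaining, x ∉ s' := by
        intro x hx
        have hxs : x ∉ s := hfresh x (by simp [hsub x hx])
        have hxt : x ≠ t := hrem_ne x hx
        rw [hs']
        split
        · rw [PySem.Set.mem_add]; rintro (h | h); exact hxs h; exact hxt h
        · exact hxs
      have hrec : fmcGo m remaining s'
          = s' ++ (dedupF remaining).filter (fun u => decide (m ≤ (remaining.count u : Int))) := by
        refine ih remaining.length ?_ _ rfl _ hfresh'
        subst hn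
        simpa [hrem] using Nat.lt_succ_of_le (List.length_filter_le _ _)
      rw [hrec]
      have hfc : (dedupF remaining).filter (fun u => decide (m ≤ (remaining.count u : Int)))
          = (dedupF remaining).filter (fun u => decide (m ≤ ((t :: l).count u : Int))) := by
        apply List.filter_congr
        intro u hu
        have hut : u ≠ t := by
          have : u ∈ remaining := by
            have : PySem.Set.ofList remaining = dedupF remaining := ofList_eq_dedupF remaining
            rw [← this] at hu
            exact (PySem.Set.mem_ofList _ _).mp hu
          exact hrem_ne u this
        have : remaining.count u = (t :: l).count u := by
          rw [hrem, count_filter_ne u t l hut]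
          simp [Ne.symm hut]
        rw [this]
      by_cases hq : m ≤ (((t :: l).length : Int) - (remaining.length : Int))
      · have hq' : m ≤ ((t :: l).count t : Int) := hlen ▸ hq
        rw [hs', if_pos hq, PySem.Set.add_of_not_mem ht, hfc]
        rw [List.filter_cons, if_pos (by simpa using hq')]
        simp
      · have hq' : ¬ m ≤ ((t :: l).count t : Int) := hlen ▸ hq
        rw [hs', if_neg hq, hfc]
        rw [List.filter_cons, if_neg (by simpa using hq')]

-- ===== VERDICT =====
theorem find_min_count_spec : Claim_equal_find_min_count := by
  intro tokens min_count _ hpre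
  unfold Spec_find_min_count find_min_count find_min_count_alt
  have hneg : ¬ min_count < 0 := not_lt.mpr hpre
  rw [if_neg hneg, if_neg hneg, count_tokens_eq_counter, PySem.Dict.items_counter,
    List.foldl_map]
  have hA := foldl_addIf_nodup (fun t => decide (min_count ≤ (tokens.count t : Int)))
    (PySem.Set.ofList tokens) PySem.Set.empty (PySem.Set.nodup_ofList tokens) (by intro x _; simp [PySem.Set.empty])
  have hB := fmcGo_eq min_count tokens PySem.Set.empty (by intro x _; simp [PySem.Set.empty])
  simp only [PySem.Set.empty] at hA hB
  rw [← ofList_eq_dedupF] at hB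
  simpa [hB] using hA
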